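-- pv_equiv track=rewrite | github.com/s2e-lab/Code-Smell-Code-Generation | Validation/PylintSamples/W0125_1830.py | drying_strategy
-- ===== SOURCE A (Python) =====
-- import heapq
-- import heapq
-- import heapq
-- import heapq
-- import heapq
--
-- def drying_strategy (rains):
--     # Idea: greedy method
--     # Always dry the lake which is most urgent.
--     # Never dry already-dry lakes, unless no lakes are full.
--
--     # Alternate method: orthogonal.
--     # Consider each lake and how many times you should dry it.
--     # Ignore any lake that is only filled once.
--
--     # Maintain a heap of (lake, urgency) for filled lakes.
--     # Whenever a lake is filled, its urgency is pushed into the heap.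
--     # Whenever we can dry a lake, we take the most urgent task on the top of the heap.
--
--     last_rain = {} # updating
--     chain_rain = {} # persistent, link from one rain to next
--
--     for time, rain in enumerate (rains):
--         if rain > 0:
--             if rain in last_rain:
--                 chain_rain[last_rain[rain]] = time
--             last_rain[rain] = time
--
--     del last_rain
--
--     urgency = []
--     filled = set ()
--
--     solution = []
--
--     for time, rain in enumerate (rains):
--         if rain > 0:
--             if rain in filled:
--                 # flooded
--                 return []
--             else:
--                 filled.add (rain)
--                 if time in chain_rain: # has next rain
--                     heapq.heappush (urgency, chain_rain[time])
--                     # add next rain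
--             solution.append (-1) # wait
--         else:
--             # clear day. find the next urgent and dry.
--             solved = False
--             while not solved:
--                 if not urgency:
--                     solution.append (1)
--                     if 1 in filled: filled.remove (1)
--                     solved = True
--                 else:
--                     time = heapq.heappop (urgency)
--                     rain = rains[time]
--                     if rain not in filled:
--                         pass # nothing to worry about
--                     else:
--                         solution.append (rain)
--                         filled.remove (rain)
--                         solved = True
--
--     return solution
--
-- rains = [1, 2, 0, 0, 2, 1]
-- ===== SOURCE B (Python) =====
-- def drying_strategy(rains):
--     # Simpler: no heap and no precomputed chains. Keep the set of full lakes;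
--     # on a clear day, look ahead for the earliest future rain that hits a full
--     # lake and dry that lake (the earliest-deadline choice made directly).
--     n = len(rains)
--     full = set()
--     res = []
--     for day, lake in enumerate(rains):
--         if lake > 0:
--             if lake in full:
--                 return []
--             full.add(lake)
--             res.append(-1)
--         else:
--             t = day + 1
--             while t < n and rains[t] not in full:
--                 t += 1
--             if t == n:
--                 res.append(1)
--             else:
--                 res.append(rains[t])
--                 full.remove(rains[t])
--     return res
-- ===== Notes on version B (the rewrite author's own statement) =====
-- stated objective: simpler
-- what changed: B drops A's two chain-building dict passes and its lazily-deleted heap of deadlines entirely: it keeps only the set of currently full lakes and, on each clear day, scans forward from the current day for the earliest future rain that hits a full lake, drying that lake (the same earliest-deadline choice computed directly).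
import Mathlib
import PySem

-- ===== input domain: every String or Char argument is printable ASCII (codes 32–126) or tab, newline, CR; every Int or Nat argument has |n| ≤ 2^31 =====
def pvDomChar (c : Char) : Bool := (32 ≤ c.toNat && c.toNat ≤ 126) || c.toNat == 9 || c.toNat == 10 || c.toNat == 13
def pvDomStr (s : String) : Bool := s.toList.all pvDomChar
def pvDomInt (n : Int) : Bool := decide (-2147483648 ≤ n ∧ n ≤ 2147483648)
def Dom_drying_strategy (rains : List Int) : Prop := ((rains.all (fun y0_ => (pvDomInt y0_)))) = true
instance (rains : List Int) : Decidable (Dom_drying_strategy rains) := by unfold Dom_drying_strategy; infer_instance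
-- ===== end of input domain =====

-- B replaces A's heap of deadlines and the two chain-building dict passes by a single
-- set of full lakes plus, on each clear day, a direct forward scan for the earliest
-- future rain hitting a full lake (objective: simpler; B is not faster).

-- ===== PORT A =====
-- first loop: build last_rain / chain_rain over enumerate(rains)
def dsChainStep (st : PySem.Dict Int Int × PySem.Dict Int Int) (p : Int × Int) :
    PySem.Dict Int Int × PySem.Dict Int Int :=
  if p.2 > 0 then
    let chain' := match st.1.get? p.2 with
      | some d => st.2.insert d p.1
      | none => st.2
    (st.1.insert p.2 p.1, chain')
  else st

def dsChain (rains : List Int) : PySem.Dict Int Int :=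
  ((PySem.List.enumerate rains 0).foldl dsChainStep (PySem.Dict.empty, PySem.Dict.empty)).2

-- heapq on Ints, modelled as a sorted list: heappush = sorted insert, heappop = take head
def heapPush (h : List Int) (x : Int) : List Int :=
  PySem.List.insertBy (fun a b => decide (a < b)) x h

-- the inner 'while not solved' loop: pop until a still-filled lake (or the heap is empty)
def dsDry (rains : List Int) : List Int → PySem.Set Int → (Int × List Int × PySem.Set Int)
  | [], filled => (1, [], PySem.Set.discard filled 1)   -- 'if 1 in filled: filled.remove(1)'
  | t :: rest, filled =>
      match PySem.List.pyGet? rains t with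
      | none => (1, rest, filled)   -- unreachable: heap entries are always valid indices
      | some rain =>
        if PySem.Set.contains filled rain then (rain, rest, PySem.Set.discard filled rain)
        else dsDry rains rest filled

-- second loop over enumerate(rains)
def dsMain (rains : List Int) (chain : PySem.Dict Int Int) :
    List (Int × Int) → List Int → PySem.Set Int → List Int → List Int
  | [], _, _, sol => sol
  | (time, rain) :: rest, urg, filled, sol =>
      if rain > 0 then
        if PySem.Set.contains filled rain then []
        else
          let urg' := match chain.get? time with
            | some nxt => heapPush urg nxt
            | none => urg
          dsMain rains chain rest urg' (PySem.Set.add filled rain) (sol ++ [-1])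
      else
        let r := dsDry rains urg filled
        dsMain rains chain rest r.2.1 r.2.2 (sol ++ [r.1])

def drying_strategy (rains : List Int) : List Int :=
  dsMain rains (dsChain rains) (PySem.List.enumerate rains 0) [] PySem.Set.empty []

-- ===== PORT B =====
-- 'while t < n and rains[t] not in full: t += 1' (indices stay in [day+1, n], always valid)
def dsScanB (rains : List Int) (full : PySem.Set Int) (n t : Int) : Int :=
  if h : t < n then
    if PySem.Set.contains full (PySem.List.pyGetD rains t 0) then t
    else dsScanB rains full n (t + 1)
  else t
termination_by (n - t).toNat
decreasing_by omega

def dsMainB (rains : List Int) (n : Int) :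
    List (Int × Int) → PySem.Set Int → List Int → List Int
  | [], _, res => res
  | (day, lake) :: rest, full, res =>
      if lake > 0 then
        if PySem.Set.contains full lake then []
        else dsMainB rains n rest (PySem.Set.add full lake) (res ++ [-1])
      else
        let t := dsScanB rains full n (day + 1)
        if t = n then dsMainB rains n rest full (res ++ [1])
        else
          let k := PySem.List.pyGetD rains t 0
          dsMainB rains n rest (PySem.Set.discard full k) (res ++ [k])
          -- full.remove(rains[t]): rains[t] ∈ full at a hit, so remove = discard here

def drying_strategy_alt (rains : List Int) : List Int :=
  dsMainB rains (rains.length : Int) (PySem.List.enumerate rains 0) PySem.Set.empty []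

-- ===== PRECONDITION & SPEC =====
def Spec_drying_strategy (rains : List Int) (out : List Int) : Prop := out = drying_strategy_alt rains
instance (rains : List Int) (out : List Int) : Decidable (Spec_drying_strategy rains out) := by unfold Spec_drying_strategy; infer_instance

-- ===== CLAIM (what is proved, stated in full; the proofs are below) =====
def Claim_equal_drying_strategy : Prop := ∀ (rains : List Int), Dom_drying_strategy rains → Spec_drying_strategy rains (drying_strategy rains)

-- ===== LEMMAS AND PROOFS =====

-- first index ≥ a at which pred holds (proof-side reference function)
def dsFF (l : List Int) (pred : Int → Bool) (a : Nat) : Option Nat :=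
  if h : a < l.length then
    if pred l[a] then some a else dsFF l pred (a + 1)
  else none
termination_by l.length - a

theorem dsFF_none_iff (l : List Int) (pred : Int → Bool) (a : Nat) :
    dsFF l pred a = none ↔ ∀ j : Nat, a ≤ j → ∀ hj : j < l.length, pred l[j] = false := by
  fun_induction dsFF l pred a with
  | case1 a h hp =>
    simp only [reduceCtorEq, false_iff]
    intro hall
    have := hall a le_rfl h
    simp [hp] at this
  | case2 a h hp ih =>
    rw [ih]
    constructor
    · intro hall j hj hjl
      rcases Nat.eq_or_lt_of_le hj with rfl | hj'
      · simpa using hp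
      · exact hall j hj' hjl
    · intro hall j hj hjl
      exact hall j (Nat.le_of_succ_le hj) hjl
  | case3 a h =>
    simp only [true_iff]
    intro j _ hj
    omega

theorem dsFF_some_iff (l : List Int) (pred : Int → Bool) (a : Nat) (m : Nat) :
    dsFF l pred a = some m ↔
      a ≤ m ∧ ∃ hm : m < l.length, pred l[m] = true ∧
        ∀ j : Nat, a ≤ j → j < m → ∀ hj : j < l.length, pred l[j] = false := by
  fun_induction dsFF l pred a with
  | case1 a h hp =>
    simp only [Option.some_inj]
    constructor
    · rintro rfl
      exact ⟨le_rfl, h, hp, fun j h1 h2 _ => by omega⟩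
    · rintro ⟨ham, hm, hpm, hfirst⟩
      by_contra hne
      have := hfirst a le_rfl (by omega) h
      simp [hp] at this
  | case2 a h hp ih =>
    rw [ih]
    constructor
    · rintro ⟨ham, hm, hpm, hfirst⟩
      refine ⟨by omega, hm, hpm, ?_⟩
      intro j hj hjm hjl
      rcases Nat.eq_or_lt_of_le hj with rfl | hj'
      · simpa using hp
      · exact hfirst j hj' hjm hjl
    · rintro ⟨ham, hm, hpm, hfirst⟩
      have hne : a ≠ m := by
        rintro rfl
        simp [hpm] at hp
      refine ⟨by omega, hm, hpm, ?_⟩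
      intro j hj hjm hjl
      exact hfirst j (by omega) hjm hjl
  | case3 a h =>
    simp only [reduceCtorEq, false_iff]
    rintro ⟨ham, hm, _⟩
    omega

-- invariants of A's first (chain-building) loop, relative to the processed prefix [0, s)
def dsL (rains : List Int) (s : Nat) (last : PySem.Dict Int Int) : Prop :=
  ∀ r d : Int, last.get? r = some d ↔
    ∃ p : Nat, d = (p : Int) ∧ p < s ∧ ∃ h : p < rains.length, rains[p] = r ∧ 0 < r ∧
      ∀ q : Nat, p < q → q < s → ∀ hq : q < rains.length, rains[q] ≠ r

def dsC (rains : List Int) (s : Nat) (chain : PySem.Dict Int Int) : Prop :=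
  ∀ dI t : Int, chain.get? dI = some t ↔
    ∃ p q : Nat, dI = (p : Int) ∧ t = (q : Int) ∧ p < q ∧ q < s ∧
      ∃ (hp : p < rains.length) (hq : q < rains.length), rains[q] = rains[p] ∧ 0 < rains[p] ∧
        ∀ j : Nat, p < j → j < q → ∀ hj : j < rains.length, rains[j] ≠ rains[p]

theorem dsChain_build (rains : List Int) :
    ∀ (suf : List Int) (s : Nat) (last chain : PySem.Dict Int Int),
    suf = rains.drop s → dsL rains s last → dsC rains s chain →
    dsC rains rains.length
      (((PySem.List.enumerate suf (s : Int)).foldl dsChainStep (last, chain)).2) := by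
  intro suf
  induction suf with
  | nil =>
    intro s last chain hsuf hL hC
    have hs : rains.length ≤ s := by
      have := congrArg List.length hsuf
      simp at this
      omega
    rw [PySem.List.enumerate_nil, List.foldl_nil]
    intro dI t
    rw [hC dI t]
    constructor
    · rintro ⟨p, q, h1, h2, h3, h4, hp, hq, h5, h6, h7⟩
      exact ⟨p, q, h1, h2, h3, hq, hp, hq, h5, h6, h7⟩
    · rintro ⟨p, q, h1, h2, h3, h4, hp, hq, h5, h6, h7⟩
      exact ⟨p, q, h1, h2, h3, by omega, hp, hq, h5, h6, h7⟩
  | cons x xs ih =>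
    intro s last chain hsuf hL hC
    have hsl : s < rains.length := by
      have := congrArg List.length hsuf
      simp at this
      omega
    have hx : rains[s] = x := by
      have h0 := congrArg (fun l => l[0]?) hsuf
      simp [List.getElem?_drop] at h0
      rw [List.getElem?_eq_getElem hsl] at h0
      exact (Option.some_inj.mp h0).symm
    have hxs : xs = rains.drop (s + 1) := by
      have := congrArg List.tail hsuf
      simpa [List.tail_drop] using this
    rw [PySem.List.enumerate_cons, List.foldl_cons]
    have hcast : ((s : Int) + 1) = ((s + 1 : Nat) : Int) := by push_cast; ring
    rw [hcast]
    -- invariants are preserved by one step of the first loop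
    by_cases hxpos : 0 < x
    · -- rain day: last_rain updated, chain possibly extended
      have hstep : dsChainStep (last, chain) ((s : Int), x) =
          (last.insert x (s : Int),
            match last.get? x with
            | some d => chain.insert d (s : Int)
            | none => chain) := by
        simp [dsChainStep, hxpos]
      rw [hstep]
      have hL' : dsL rains (s + 1) (last.insert x (s : Int)) := by
        intro r d
        rw [PySem.Dict.get?_insert]
        by_cases hr : r = x
        · subst hr
          rw [if_pos rfl]
          constructor
          · rintro hd
            have hd' : d = (s : Int) := (Option.some_inj.mp hd).symm
            exact ⟨s, hd', by omega, hsl, hx, hxpos, fun q h1 h2 _ => by omega⟩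
          · rintro ⟨p, hd, hps, hplen, hval, hpos, hfirst⟩
            have hps' : p = s := by
              by_contra hne
              have hplt : p < s := by omega
              exact hfirst s hplt (by omega) hsl (hx.trans rfl ▸ rfl)
            subst hps'
            rw [hd]
        · rw [if_neg hr]
          rw [hL r d]
          constructor
          · rintro ⟨p, hd, hps, hplen, hval, hpos, hfirst⟩
            refine ⟨p, hd, by omega, hplen, hval, hpos, ?_⟩
            intro q h1 h2 hq
            by_cases hqs : q = s
            · subst hqs
              rw [hx]
              exact fun hcon => hr hcon.symm
            · exact hfirst q h1 (by omega) hq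
          · rintro ⟨p, hd, hps, hplen, hval, hpos, hfirst⟩
            have hpne : p ≠ s := by
              intro hps'
              subst hps'
              rw [hx] at hval
              exact hr hval.symm
            refine ⟨p, hd, by omega, hplen, hval, hpos, ?_⟩
            intro q h1 h2 hq
            exact hfirst q h1 (by omega) hq
      have hC' : dsC rains (s + 1)
          (match last.get? x with
            | some d => chain.insert d (s : Int)
            | none => chain) := by
        cases hlast : last.get? x with
        | none =>
          simp only
          intro dI t
          rw [hC dI t]
          constructor
          · rintro ⟨p, q, h1, h2, h3, h4, hp, hq, h5, h6, h7⟩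
            exact ⟨p, q, h1, h2, h3, by omega, hp, hq, h5, h6, h7⟩
          · rintro ⟨p, q, h1, h2, h3, h4, hp, hq, h5, h6, h7⟩
            by_cases hqs : q = s
            · -- the new day closes a pair (p, s): then p would be a last occurrence of x,
              -- contradicting last_rain having no entry for x
              exfalso
              subst hqs
              have hvx : rains[p] = x := by rw [← h5, hx]
              have : last.get? x = some (p : Int) := by
                rw [hL x (p : Int)]
                refine ⟨p, rfl, h3, hp, hvx, hxpos, ?_⟩
                intro j hj1 hj2 hj
                have := h7 j hj1 hj2 hj
                rw [hvx] at this
                exact this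
              rw [hlast] at this
              exact absurd this (by simp)
            · exact ⟨p, q, h1, h2, h3, by omega, hp, hq, h5, h6, h7⟩
        | some dlast =>
          simp only
          obtain ⟨p₀, hd0, hp0s, hp0len, hval0, hpos0, hlast0⟩ := (hL x dlast).mp hlast
          subst hd0
          intro dI t
          rw [PySem.Dict.get?_insert]
          by_cases hdI : dI = (p₀ : Int)
          · subst hdI
            rw [if_pos rfl]
            constructor
            · intro ht
              have ht' : t = (s : Int) := (Option.some_inj.mp ht).symm
              refine ⟨p₀, s, rfl, ht', hp0s, by omega, hp0len, hsl, ?_, ?_, ?_⟩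
              · rw [hx, hval0]
              · rw [hval0]; exact hxpos
              · intro j hj1 hj2 hj
                rw [hval0]
                exact hlast0 j hj1 hj2 hj
            · rintro ⟨p, q, h1, h2, h3, h4, hp, hq, h5, h6, h7⟩
              have hpp : p = p₀ := by omega
              subst hpp
              have hqs : q = s := by
                by_contra hne
                have hql : q < s := by omega
                exact (hlast0 q h3 hql hq) (by rw [h5, hval0])
              subst hqs
              rw [h2]
          · rw [if_neg hdI]
            rw [hC dI t]
            constructor
            · rintro ⟨p, q, h1, h2, h3, h4, hp, hq, h5, h6, h7⟩
              exact ⟨p, q, h1, h2, h3, by omega, hp, hq, h5, h6, h7⟩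
            · rintro ⟨p, q, h1, h2, h3, h4, hp, hq, h5, h6, h7⟩
              by_cases hqs : q = s
              · exfalso
                subst hqs
                have hvx : rains[p] = x := by rw [← h5, hx]
                have : last.get? x = some (p : Int) := by
                  rw [hL x (p : Int)]
                  refine ⟨p, rfl, h3, hp, hvx, hxpos, ?_⟩
                  intro j hj1 hj2 hj
                  have := h7 j hj1 hj2 hj
                  rw [hvx] at this
                  exact this
                rw [hlast] at this
                have : (p₀ : Int) = (p : Int) := Option.some_inj.mp this
                exact hdI (by rw [h1, ← this])
              · exact ⟨p, q, h1, h2, h3, by omega, hp, hq, h5, h6, h7⟩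
      exact ih (s + 1) _ _ hxs hL' hC'
    · -- clear day: state unchanged
      have hstep : dsChainStep (last, chain) ((s : Int), x) = (last, chain) := by
        simp [dsChainStep, hxpos]
      rw [hstep]
      have hxle : x ≤ 0 := by omega
      have hL' : dsL rains (s + 1) last := by
        intro r d
        rw [hL r d]
        constructor
        · rintro ⟨p, hd, hps, hplen, hval, hpos, hfirst⟩
          refine ⟨p, hd, by omega, hplen, hval, hpos, ?_⟩
          intro q h1 h2 hq
          by_cases hqs : q = s
          · subst hqs
            rw [hx]
            omega
          · exact hfirst q h1 (by omega) hq
        · rintro ⟨p, hd, hps, hplen, hval, hpos, hfirst⟩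
          have hpne : p ≠ s := by
            intro hps'
            subst hps'
            rw [hx] at hval
            omega
          refine ⟨p, hd, by omega, hplen, hval, hpos, ?_⟩
          intro q h1 h2 hq
          exact hfirst q h1 (by omega) hq
      have hC' : dsC rains (s + 1) chain := by
        intro dI t
        rw [hC dI t]
        constructor
        · rintro ⟨p, q, h1, h2, h3, h4, hp, hq, h5, h6, h7⟩
          exact ⟨p, q, h1, h2, h3, by omega, hp, hq, h5, h6, h7⟩
        · rintro ⟨p, q, h1, h2, h3, h4, hp, hq, h5, h6, h7⟩
          by_cases hqs : q = s
          · exfalso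
            subst hqs
            rw [hx] at h5
            omega
          · exact ⟨p, q, h1, h2, h3, by omega, hp, hq, h5, h6, h7⟩
      exact ih (s + 1) _ _ hxs hL' hC'

theorem dsChain_spec (rains : List Int) : dsC rains rains.length (dsChain rains) := by
  have hL0 : dsL rains 0 PySem.Dict.empty := by
    intro r d
    simp only [PySem.Dict.get?_empty]
    constructor
    · intro h
      exact absurd h (by simp)
    · rintro ⟨p, _, hps, _⟩
      omega
  have hC0 : dsC rains 0 PySem.Dict.empty := by
    intro dI t
    simp only [PySem.Dict.get?_empty]
    constructor
    · intro h
      exact absurd h (by simp)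
    · rintro ⟨p, q, _, _, _, hqs, _⟩
      omega
  have h := dsChain_build rains rains 0 PySem.Dict.empty PySem.Dict.empty (by simp) hL0 hC0
  simpa [dsChain] using h

-- B's scan loop computes the first future index whose lake is in `full`
theorem dsScan_eq (rains : List Int) (full : PySem.Set Int) (a : Nat) (hale : a ≤ rains.length) :
    dsScanB rains full (rains.length : Int) (a : Int) =
      match dsFF rains (fun x => PySem.Set.contains full x) a with
      | none => (rains.length : Int)
      | some m => (m : Int) := by
  have hkey : ∀ (k : Nat), ∀ (a : Nat), a ≤ rains.length → rains.length - a ≤ k →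
      dsScanB rains full (rains.length : Int) (a : Int) =
        match dsFF rains (fun x => PySem.Set.contains full x) a with
        | none => (rains.length : Int)
        | some m => (m : Int) := by
    intro k
    induction k with
    | zero =>
      intro a hle ha
      have hlen : a = rains.length := by omega
      subst hlen
      rw [dsScanB, dsFF]
      rw [dif_neg (by omega), dif_neg (by exact_mod_cast by omega)]
    | succ k ih =>
      intro a hle ha
      by_cases hal : a < rains.length
      · rw [dsScanB, dsFF]
        rw [dif_pos hal, dif_pos (by exact_mod_cast hal)]
        have hget : PySem.List.pyGetD rains (a : Int) 0 = rains[a] := by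
          rw [PySem.List.pyGetD_natCast]
          exact List.getD_eq_getElem rains 0 hal
        rw [hget]
        by_cases hc : PySem.Set.contains full rains[a] = true
        · have hmem : rains[a] ∈ full := by simpa using hc
          simp [hmem]
        · rw [if_neg hc, if_neg hc]
          have hcast : ((a : Int) + 1) = ((a + 1 : Nat) : Int) := by push_cast; ring
          rw [hcast]
          exact ih (a+1) (by omega) (by omega)
      · have heq : a = rains.length := by omega
        subst heq
        rw [dsScanB, dsFF]
        rw [dif_neg (by omega), dif_neg (by exact_mod_cast by omega)]
  exact hkey rains.length a hale (by omega)

-- the coupling invariant of the two main loops at day i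
def dsInv (rains : List Int) (i : Nat) (urg : List Int) (filled full : PySem.Set Int) : Prop :=
  (∀ x ∈ filled, x ∈ full) ∧
  (∀ x ∈ full, x ∈ filled ∨ ∀ j : Nat, i ≤ j → ∀ hj : j < rains.length, rains[j] ≠ x) ∧
  (∀ x ∈ filled, 0 < x) ∧
  urg.Pairwise (· < ·) ∧
  (∀ v : Int, v ∈ urg ↔ ∃ m : Nat, v = (m : Int) ∧ i ≤ m ∧ ∃ h : m < rains.length,
      rains[m] ∈ filled ∧ ∀ j : Nat, i ≤ j → j < m → ∀ hj : j < rains.length, rains[j] ≠ rains[m])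

-- sorted inserts of fresh elements keep the heap list strictly increasing
theorem dsInsertBy_pairwise (x : Int) (l : List Int) (h : l.Pairwise (· < ·)) (hx : x ∉ l) :
    (PySem.List.insertBy (fun a b => decide (a < b)) x l).Pairwise (· < ·) := by
  induction l with
  | nil => simp [PySem.List.insertBy]
  | cons y ys ih =>
    rw [PySem.List.insertBy]
    by_cases hlt : x < y
    · rw [if_pos (by simpa using hlt)]
      refine List.Pairwise.cons ?_ h
      intro z hz
      rcases List.mem_cons.mp hz with rfl | hz
      · exact hlt
      · exact lt_trans hlt (List.rel_of_pairwise_cons h hz)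
    · rw [if_neg (by simpa using hlt)]
      have hyx : y < x := by
        rcases lt_or_eq_of_le (not_lt.mp hlt) with h' | h'
        · exact h'
        · exact absurd h'.symm (by intro he; exact hx (he ▸ List.mem_cons_self))
      refine List.Pairwise.cons ?_ (ih (List.Pairwise.of_cons h) (fun hm => hx (List.mem_cons_of_mem y hm)))
      intro z hz
      rw [PySem.List.mem_insertBy] at hz
      rcases hz with rfl | hz
      · exact hyx
      · exact List.rel_of_pairwise_cons h hz

-- an occurrence of k at or after a yields a FIRST occurrence of k at or after a
theorem dsFirst_exists (rains : List Int) (k : Int) (a j : Nat) (haj : a ≤ j)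
    (hj : j < rains.length) (hv : rains[j] = k) :
    ∃ m, a ≤ m ∧ m ≤ j ∧ ∃ hm : m < rains.length, rains[m] = k ∧
      ∀ j' : Nat, a ≤ j' → j' < m → ∀ hj' : j' < rains.length, rains[j'] ≠ k := by
  cases hff : dsFF rains (fun y => decide (y = k)) a with
  | none =>
    exfalso
    have := (dsFF_none_iff rains _ a).mp hff j haj hj
    simp [hv] at this
  | some m =>
    obtain ⟨ham, hm, hpm, hfirst⟩ := (dsFF_some_iff rains _ a m).mp hff
    have hmj : m ≤ j := by
      by_contra hc
      have := hfirst j haj (by omega) hj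
      simp [hv] at this
    refine ⟨m, ham, hmj, hm, by simpa using hpm, ?_⟩
    intro j' h1 h2 hj'
    have := hfirst j' h1 h2 hj'
    simpa using this

theorem dsMain_eq (rains : List Int) :
    ∀ (suf : List Int) (i : Nat) (urg : List Int) (filled full : PySem.Set Int) (sol : List Int),
    suf = rains.drop i → dsInv rains i urg filled full →
    dsMain rains (dsChain rains) (PySem.List.enumerate suf (i : Int)) urg filled sol =
      dsMainB rains (rains.length : Int) (PySem.List.enumerate suf (i : Int)) full sol := by
  intro suf
  induction suf with
  | nil =>
    intro i urg filled full sol _ _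
    rw [PySem.List.enumerate_nil]
    rfl
  | cons x xs ih =>
    intro i urg filled full sol hsuf hinv
    obtain ⟨I1, I2, I3, I4, I5⟩ := hinv
    have hil : i < rains.length := by
      have := congrArg List.length hsuf
      simp at this
      omega
    have hx : rains[i] = x := by
      have h0 := congrArg (fun l => l[0]?) hsuf
      simp [List.getElem?_drop] at h0
      rw [List.getElem?_eq_getElem hil] at h0
      exact (Option.some_inj.mp h0).symm
    have hxs : xs = rains.drop (i + 1) := by
      have := congrArg List.tail hsuf
      simpa [List.tail_drop] using this
    rw [PySem.List.enumerate_cons, dsMain, dsMainB]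
    have hcast : ((i : Int) + 1) = ((i + 1 : Nat) : Int) := by push_cast; ring
    by_cases hxpos : 0 < x
    · rw [if_pos hxpos, if_pos hxpos]
      by_cases hmem : x ∈ filled
      · rw [if_pos ((PySem.Set.contains_iff filled x).mpr hmem),
            if_pos ((PySem.Set.contains_iff full x).mpr (I1 x hmem))]
      · have hnful : x ∉ full := by
          intro hxf
          rcases I2 x hxf with h | h
          · exact hmem h
          · exact (h i le_rfl hil) hx
        rw [if_neg (by simp [hmem]), if_neg (by simp [hnful])]
        rw [hcast]
        -- the invariant is preserved with the new lake filled
        have hI1' : ∀ y ∈ PySem.Set.add filled x, y ∈ PySem.Set.add full x := by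
          intro y hy
          rw [PySem.Set.mem_add] at hy ⊢
          rcases hy with hy | hy
          · exact Or.inl (I1 y hy)
          · exact Or.inr hy
        have hI2' : ∀ y ∈ PySem.Set.add full x, y ∈ PySem.Set.add filled x ∨
            ∀ j : Nat, i + 1 ≤ j → ∀ hj : j < rains.length, rains[j] ≠ y := by
          intro y hy
          rcases (PySem.Set.mem_add full x y).mp hy with hy | hy
          · rcases I2 y hy with h | h
            · exact Or.inl ((PySem.Set.mem_add filled x y).mpr (Or.inl h))
            · exact Or.inr (fun j h1 hj => h j (by omega) hj)
          · exact Or.inl ((PySem.Set.mem_add filled x y).mpr (Or.inr hy))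
        have hI3' : ∀ y ∈ PySem.Set.add filled x, 0 < y := by
          intro y hy
          rcases (PySem.Set.mem_add filled x y).mp hy with hy | hy
          · exact I3 y hy
          · exact hy ▸ hxpos
        cases hchain : (dsChain rains).get? (i : Int) with
        | none =>
          -- lake x never rains again: the heap is unchanged
          have hnofut : ∀ j : Nat, i < j → ∀ hj : j < rains.length, rains[j] ≠ x := by
            intro j h1 hj hvj
            obtain ⟨m, ham, hmj, hm, hvm, hfirst⟩ :=
              dsFirst_exists rains x (i+1) j (by omega) hj hvj
            have : (dsChain rains).get? (i : Int) = some (m : Int) := by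
              rw [dsChain_spec rains (i : Int) (m : Int)]
              refine ⟨i, m, rfl, rfl, by omega, hm, hil, hm, by rw [hvm, hx], by rw [hx]; exact hxpos, ?_⟩
              intro j' h1' h2' hj'
              rw [hx]
              exact hfirst j' (by omega) h2' hj'
            rw [hchain] at this
            exact absurd this (by simp)
          refine ih (i+1) urg (PySem.Set.add filled x) (PySem.Set.add full x) (sol ++ [-1]) hxs
            ⟨hI1', hI2', hI3', I4, ?_⟩
          intro v
          rw [I5 v]
          constructor
          · rintro ⟨m, hvm, him, hm, hmem', hfirst⟩
            have hmne : m ≠ i := by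
              intro he
              subst he
              rw [hx] at hmem'
              exact hmem hmem'
            refine ⟨m, hvm, by omega, hm, (PySem.Set.mem_add filled x _).mpr (Or.inl hmem'), ?_⟩
            intro j h1 h2 hj
            exact hfirst j (by omega) h2 hj
          · rintro ⟨m, hvm, him, hm, hmem', hfirst⟩
            rcases (PySem.Set.mem_add filled x _).mp hmem' with hmf | hmx
            · refine ⟨m, hvm, by omega, hm, hmf, ?_⟩
              intro j h1 h2 hj
              rcases Nat.eq_or_lt_of_le h1 with rfl | h1'
              · rw [hx]
                intro hcon
                exact hmem (hcon ▸ hmf)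
              · exact hfirst j h1' h2 hj
            · exact absurd hmx (hnofut m (by omega) hm)
        | some t =>
          -- t is the (cast of the) next fill day q₀ of lake x
          obtain ⟨p, q₀, hpi, htq, hpq, hqs, hp, hq, hval, hpos, hgap⟩ :=
            (dsChain_spec rains (i : Int) t).mp hchain
          have hpi' : i = p := by omega
          subst hpi'
          subst htq
          have hq0x : rains[q₀] = x := by rw [hval, hx]
          have hq0notin : ((q₀ : Nat) : Int) ∉ urg := by
            intro hin
            obtain ⟨m, hvm, _, hm, hmem', _⟩ := (I5 _).mp hin
            have : m = q₀ := by omega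
            subst this
            rw [hq0x] at hmem'
            exact hmem hmem'
          refine ih (i+1) (heapPush urg ((q₀ : Nat) : Int)) (PySem.Set.add filled x)
            (PySem.Set.add full x) (sol ++ [-1]) hxs
            ⟨hI1', hI2', hI3', dsInsertBy_pairwise _ _ I4 hq0notin, ?_⟩
          intro v
          rw [heapPush, PySem.List.mem_insertBy, I5 v]
          constructor
          · rintro (rfl | ⟨m, hvm, him, hm, hmem', hfirst⟩)
            · refine ⟨q₀, rfl, by omega, hq, (PySem.Set.mem_add filled x _).mpr (Or.inr hq0x), ?_⟩
              intro j h1 h2 hj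
              rw [hq0x]
              rw [hx] at hgap
              exact hgap j (by omega) h2 hj
            · have hmne : m ≠ i := by
                intro he
                subst he
                rw [hx] at hmem'
                exact hmem hmem'
              refine ⟨m, hvm, by omega, hm, (PySem.Set.mem_add filled x _).mpr (Or.inl hmem'), ?_⟩
              intro j h1 h2 hj
              exact hfirst j (by omega) h2 hj
          · rintro ⟨m, hvm, him, hm, hmem', hfirst⟩
            rcases (PySem.Set.mem_add filled x _).mp hmem' with hmf | hmx
            · refine Or.inr ⟨m, hvm, by omega, hm, hmf, ?_⟩
              intro j h1 h2 hj
              rcases Nat.eq_or_lt_of_le h1 with rfl | h1'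
              · rw [hx]
                intro hcon
                exact hmem (hcon ▸ hmf)
              · exact hfirst j h1' h2 hj
            · -- m is an occurrence of x after i with nothing in between: m = q₀
              left
              have hmq : m = q₀ := by
                by_contra hne
                rcases Nat.lt_or_ge m q₀ with hlt | hge
                · rw [hx] at hgap
                  exact (hgap m (by omega) hlt hm) hmx
                · have : q₀ < m := by omega
                  exact (hfirst q₀ (by omega) this hq) (by rw [hq0x, hmx])
              rw [hvm, hmq]
    · -- clear day
      rw [if_neg hxpos, if_neg hxpos]
      cases hurg : urg with
      | nil =>
        -- empty heap: no filled lake ever rains again, B's scan finds nothing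
        have hnofut : ∀ k, k ∈ filled → ∀ j : Nat, i ≤ j → ∀ hj : j < rains.length, rains[j] ≠ k := by
          intro k hk j h1 hj hvj
          obtain ⟨m, ham, hmj, hm, hvm, hfirst⟩ := dsFirst_exists rains k i j h1 hj hvj
          have : ((m : Nat) : Int) ∈ urg := by
            rw [I5]
            exact ⟨m, rfl, ham, hm, hvm ▸ hk, fun j' a b hj' => hvm ▸ hfirst j' a b hj'⟩
          rw [hurg] at this
          simp at this
        have hffnone : dsFF rains (fun y => PySem.Set.contains full y) (i+1) = none := by
          rw [dsFF_none_iff]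
          intro j h1 hj
          by_contra hc
          have hmemf : rains[j] ∈ full := by
            rw [← PySem.Set.contains_iff full rains[j]]
            simpa using hc
          rcases I2 _ hmemf with h | h
          · exact (hnofut _ h j (by omega) hj) rfl
          · exact (h j (by omega) hj) rfl
        have hscan : dsScanB rains full (rains.length : Int) ((i : Int) + 1) = (rains.length : Int) := by
          rw [hcast, dsScan_eq rains full (i+1) (by omega), hffnone]
        rw [hscan, dsDry, if_pos rfl]
        simp only
        rw [hcast]
        refine ih (i+1) [] (PySem.Set.discard filled 1) full (sol ++ [1]) hxs
          ⟨?_, ?_, ?_, List.Pairwise.nil, ?_⟩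
        · intro y hy
          exact I1 y ((PySem.Set.mem_discard filled 1 y).mp hy).1
        · intro y hy
          rcases I2 y hy with h | h
          · by_cases hy1 : y = 1
            · subst hy1
              exact Or.inr (fun j h1 hj => hnofut 1 h j (by omega) hj)
            · exact Or.inl ((PySem.Set.mem_discard filled 1 y).mpr ⟨h, hy1⟩)
          · exact Or.inr (fun j h1 hj => h j (by omega) hj)
        · intro y hy
          exact I3 y ((PySem.Set.mem_discard filled 1 y).mp hy).1
        · intro v
          simp only [List.not_mem_nil, false_iff]
          rintro ⟨m, _, him, hm, hmem', _⟩
          exact (hnofut _ ((PySem.Set.mem_discard filled 1 _).mp hmem').1 m (by omega) hm) rfl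
      | cons v rest =>
        -- the head of the heap is the first future fill day of a filled lake
        have hvurg : v ∈ urg := by rw [hurg]; exact List.mem_cons_self
        obtain ⟨m, hvm, him, hm, hk0mem, hfirst⟩ := (I5 v).mp hvurg
        have hk0pos : 0 < rains[m] := I3 _ hk0mem
        have hxle : x ≤ 0 := by omega
        have hmi : i < m := by
          rcases Nat.eq_or_lt_of_le him with rfl | h
          · rw [hx] at hk0pos; omega
          · exact h
        -- A pops it and dries its lake at once
        have hget : PySem.List.pyGet? rains v = some rains[m] := by
          rw [hvm, PySem.List.pyGet?_natCast]
          exact List.getElem?_eq_getElem hm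
        have hcont : PySem.Set.contains filled rains[m] = true :=
          (PySem.Set.contains_iff filled rains[m]).mpr hk0mem
        have hdry : dsDry rains (v :: rest) filled =
            (rains[m], rest, PySem.Set.discard filled rains[m]) := by
          have hmemb : rains[m] ∈ filled := hk0mem
          rw [dsDry, hget]
          simp [hmemb]
        -- B's scan stops exactly at day m
        have hscan : dsFF rains (fun y => PySem.Set.contains full y) (i+1) = some m := by
          rw [dsFF_some_iff]
          refine ⟨by omega, hm, (PySem.Set.contains_iff full rains[m]).mpr (I1 _ hk0mem), ?_⟩
          intro j h1 h2 hj
          by_contra hc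
          have hmemf : rains[j] ∈ full := by
            rw [← PySem.Set.contains_iff full rains[j]]
            simpa using hc
          rcases I2 _ hmemf with hf | hnf
          · obtain ⟨m', ham', hm'j, hm', hvm', hfirst'⟩ :=
              dsFirst_exists rains rains[j] i j (by omega) hj rfl
            have hin : ((m' : Nat) : Int) ∈ urg := by
              rw [I5]
              exact ⟨m', rfl, ham', hm', hvm' ▸ hf, fun j' a b hj' => hvm' ▸ hfirst' j' a b hj'⟩
            rw [hurg] at hin
            rcases List.mem_cons.mp hin with he | hin
            · have : m' = m := by rw [hvm] at he; omega
              omega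
            · have : v < ((m' : Nat) : Int) := List.rel_of_pairwise_cons (hurg ▸ I4) hin
              rw [hvm] at this
              omega
          · exact (hnf j (by omega) hj) rfl
        have hscanB : dsScanB rains full (rains.length : Int) ((i : Int) + 1) = ((m : Nat) : Int) := by
          rw [hcast, dsScan_eq rains full (i+1) (by omega), hscan]
        rw [hscanB, hdry, if_neg (by omega : ¬ ((m : Nat) : Int) = (rains.length : Int))]
        have hgetD : PySem.List.pyGetD rains ((m : Nat) : Int) 0 = rains[m] := by
          rw [PySem.List.pyGetD_natCast]
          exact List.getD_eq_getElem rains 0 hm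
        rw [hgetD, hcast]
        have hrestpw : rest.Pairwise (· < ·) := List.Pairwise.of_cons (hurg ▸ I4)
        refine ih (i+1) rest (PySem.Set.discard filled rains[m])
          (PySem.Set.discard full rains[m]) (sol ++ [rains[m]]) hxs
          ⟨?_, ?_, ?_, hrestpw, ?_⟩
        · intro y hy
          obtain ⟨hy1, hy2⟩ := (PySem.Set.mem_discard filled rains[m] y).mp hy
          exact (PySem.Set.mem_discard full rains[m] y).mpr ⟨I1 y hy1, hy2⟩
        · intro y hy
          obtain ⟨hy1, hy2⟩ := (PySem.Set.mem_discard full rains[m] y).mp hy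
          rcases I2 y hy1 with h | h
          · exact Or.inl ((PySem.Set.mem_discard filled rains[m] y).mpr ⟨h, hy2⟩)
          · exact Or.inr (fun j h1 hj => h j (by omega) hj)
        · intro y hy
          exact I3 y ((PySem.Set.mem_discard filled rains[m] y).mp hy).1
        · intro w
          constructor
          · intro hw
            have hwurg : w ∈ urg := by rw [hurg]; exact List.mem_cons_of_mem v hw
            obtain ⟨m', hw', him', hm', hmem', hfirst'⟩ := (I5 w).mp hwurg
            have hvw : v < w := List.rel_of_pairwise_cons (hurg ▸ I4) hw
            have hmm' : m < m' := by rw [hvm] at hvw; rw [hw'] at hvw; exact_mod_cast hvw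
            have hne : rains[m'] ≠ rains[m] := by
              intro he
              exact (hfirst' m him hmm' hm) he.symm
            refine ⟨m', hw', by omega, hm',
              (PySem.Set.mem_discard filled rains[m] rains[m']).mpr ⟨hmem', hne⟩, ?_⟩
            intro j h1 h2 hj
            exact hfirst' j (by omega) h2 hj
          · rintro ⟨m', hw', him', hm', hmem', hfirst'⟩
            obtain ⟨hmemf', hne'⟩ := (PySem.Set.mem_discard filled rains[m] rains[m']).mp hmem'
            have hin : w ∈ urg := by
              rw [I5]
              refine ⟨m', hw', by omega, hm', hmemf', ?_⟩
              intro j h1 h2 hj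
              rcases Nat.eq_or_lt_of_le h1 with rfl | h1'
              · rw [hx]
                have := I3 _ hmemf'
                omega
              · exact hfirst' j h1' h2 hj
            rw [hurg] at hin
            rcases List.mem_cons.mp hin with he | hin
            · exfalso
              rw [hvm] at he
              have hm'm : m' = m := by omega
              subst hm'm
              exact hne' rfl
            · exact hin


-- ===== VERDICT (by name: the statement is the Claim_ definition above) =====
theorem drying_strategy_spec : Claim_equal_drying_strategy := by
  intro rains _
  unfold Spec_drying_strategy drying_strategy drying_strategy_alt
  have h := dsMain_eq rains rains 0 [] PySem.Set.empty PySem.Set.empty []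
    (by simp) (by
      refine ⟨by simp [PySem.Set.empty], by simp [PySem.Set.empty], by simp [PySem.Set.empty],
        List.Pairwise.nil, ?_⟩
      intro v
      simp [PySem.Set.empty])
  simpa using h
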